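-- pv_equiv track=rewrite | github.com/jusdhrv/Vertical-Horizontal-Products-of-Grid-Equal-Challenge | main_all.py | memoized_indices
-- ===== SOURCE A (Python) =====
-- def memoized_indices(n):
--     start_indices = [j * n for j in range(n)]
--     end_indices = [start_index + n for start_index in start_indices]
--     row_indices = [
--         list(range(start, end)) for start, end in zip(start_indices, end_indices)
--     ]
--     col_indices = [[l + m * n for m in range(n)] for l in range(n)]
--     return row_indices, col_indices
-- ===== SOURCE B (Python) =====
-- def memoized_indices(n):
--     # Build the row table once, then obtain the columns by transposing it
--     # instead of recomputing them from an independent closed form.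
--     row_indices = [list(range(i * n, i * n + n)) for i in range(n)]
--     col_indices = [list(col) for col in zip(*row_indices)]
--     return row_indices, col_indices
-- ===== Notes on version B (the rewrite author's own statement) =====
-- stated objective: alternative
-- what changed: B builds only the row table (one comprehension, no separate start/end index lists) and derives the column table by transposing the rows with zip(*rows) instead of recomputing each column from the independent closed form l + m*n.
import Mathlib
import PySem

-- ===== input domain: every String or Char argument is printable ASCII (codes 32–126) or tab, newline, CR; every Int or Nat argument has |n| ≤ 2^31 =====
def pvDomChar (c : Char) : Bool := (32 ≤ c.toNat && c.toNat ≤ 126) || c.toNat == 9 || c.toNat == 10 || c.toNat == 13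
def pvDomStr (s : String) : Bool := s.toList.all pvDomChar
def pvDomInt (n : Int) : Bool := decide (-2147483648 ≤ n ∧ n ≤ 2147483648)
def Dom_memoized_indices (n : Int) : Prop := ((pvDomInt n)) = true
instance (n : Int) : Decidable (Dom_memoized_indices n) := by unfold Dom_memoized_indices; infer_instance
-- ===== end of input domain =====

-- B computes the column table by transposing the row table; A recomputes it from a closed form.

-- ===== PORT A =====
def memoized_indices (n : Int) : List (List Int) × List (List Int) :=
  let start_indices := (PySem.List.pyRange 0 n 1).map (fun j => j * n)
  let end_indices := start_indices.map (fun s => s + n)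
  let row_indices := (start_indices.zip end_indices).map (fun p => PySem.List.pyRange p.1 p.2 1)
  let col_indices := (PySem.List.pyRange 0 n 1).map (fun l =>
    (PySem.List.pyRange 0 n 1).map (fun m => l + m * n))
  (row_indices, col_indices)

-- ===== PORT B =====
-- one step of zip(*rows): the heads of all rows and the remaining tails (none when some row is empty)
def pvHeads? (rows : List (List Int)) : Option (List Int × List (List Int)) :=
  rows.foldr
    (fun r acc =>
      match r, acc with
      | x :: xs, some (hs, ts) => some (x :: hs, xs :: ts)
      | _, _ => none)
    (some ([], []))

-- zip(*rows), fuelled by the length of the first row (an exact bound on zip's output length here,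
-- since all rows have equal length; for an empty rows list the fuel is 0, matching zip() = [])
def pvZipStar : Nat → List (List Int) → List (List Int)
  | 0, _ => []
  | fuel + 1, rows =>
    match pvHeads? rows with
    | some (hs, ts) => hs :: pvZipStar fuel ts
    | none => []

def memoized_indices_alt (n : Int) : List (List Int) × List (List Int) :=
  let row_indices := (PySem.List.pyRange 0 n 1).map (fun i =>
    PySem.List.pyRange (i * n) (i * n + n) 1)
  let fuel := (row_indices.head?.map List.length).getD 0
  let col_indices := pvZipStar fuel row_indices
  (row_indices, col_indices)

-- ===== PRECONDITION & SPEC =====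
def Spec_memoized_indices (n : Int) (out : List (List Int) × List (List Int)) : Prop := out = memoized_indices_alt n
instance (n : Int) (out : List (List Int) × List (List Int)) : Decidable (Spec_memoized_indices n out) := by unfold Spec_memoized_indices; infer_instance

-- ===== CLAIM (what is proved, stated in full; the proofs are below) =====
def Claim_equal_memoized_indices : Prop := ∀ (n : Int), Dom_memoized_indices n → Spec_memoized_indices n (memoized_indices n)

-- ===== LEMMAS AND PROOFS =====

theorem pvHeads?_map {ι : Type} (is : List ι) (h : ι → Int) (t : ι → List Int) :
    pvHeads? (is.map (fun i => h i :: t i)) = some (is.map h, is.map t) := by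
  induction is with
  | nil => rfl
  | cons a as ih =>
    simp only [List.map_cons, pvHeads?, List.foldr] at *
    rw [ih]

-- transposing a rectangular table of comprehensions swaps the two index maps
theorem pvZipStar_rect {ι : Type} (c : Nat) (is : List ι) (f : ι → Nat → Int) :
    pvZipStar c (is.map (fun i => (List.range c).map (f i))) =
      (List.range c).map (fun j => is.map (fun i => f i j)) := by
  induction c generalizing f with
  | zero => simp [pvZipStar]
  | succ c ih =>
    rw [List.range_succ_eq_map]
    simp only [List.map_cons, List.map_map, Function.comp_def, Nat.succ_eq_add_one]
    rw [pvZipStar, pvHeads?_map is (fun i => f i 0) (fun i => (List.range c).map (fun j => f i (j + 1)))]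
    simp only [ih (fun i j => f i (j + 1))]

theorem pyRange_row (a n : Int) :
    PySem.List.pyRange a (a + n) 1 = (List.range n.toNat).map (fun k : Nat => a + (k : Int)) := by
  rw [PySem.List.pyRange_one]
  have h : a + n - a = n := by ring
  rw [h]

-- ===== VERDICT (by name: the statement is the Claim_ definition above) =====
theorem memoized_indices_spec : Claim_equal_memoized_indices := by
  intro n _
  unfold Spec_memoized_indices memoized_indices memoized_indices_alt
  simp only [List.zip_map', List.map_map, Function.comp_def]
  rcases (by omega : n ≤ 0 ∨ 0 < n) with hn | hn
  · simp [PySem.List.pyRange_one_eq_nil hn, pvZipStar]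
  · have hc : (0:Nat) < n.toNat := by omega
    have hrow : ∀ i : Int, PySem.List.pyRange (i * n) (i * n + n) 1
        = (List.range n.toNat).map (fun k : Nat => i * n + (k : Int)) := fun i => pyRange_row (i * n) n
    simp only [Prod.mk.injEq]
    constructor
    · simp
    · -- columns
      simp only [hrow]
      have hne : PySem.List.pyRange 0 n 1 ≠ [] := by
        have := PySem.List.length_pyRange_one (a := 0) (b := n)
        intro h; rw [h] at this; simp at this; omega
      have hfuel : (((PySem.List.pyRange 0 n 1).map (fun i =>
          (List.range n.toNat).map (fun k : Nat => i * n + (k : Int)))).head?.map List.length).getD 0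
          = n.toNat := by
        obtain ⟨x, xs, hx⟩ := List.exists_cons_of_ne_nil hne
        rw [hx]; simp
      rw [hfuel,
        pvZipStar_rect n.toNat (PySem.List.pyRange 0 n 1) (fun (i : Int) (k : Nat) => i * n + (k : Int)),
        PySem.List.pyRange_one 0 n]
      simp only [List.map_map, Function.comp_def, zero_add, Int.sub_zero]
      apply List.map_congr_left
      intro j _
      apply List.map_congr_left
      intro i _
      ring
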